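-- pv_equiv track=rewrite | github.com/doyeonjeong/COS-PRO-1 | 4회/4-10.py | solution
-- ===== SOURCE A (Python) =====
-- import math
--
-- def get_prime(b):           # b = 30
--     e = int(math.sqrt(b))   # e = 5
--     is_prime = [0] * (e+1)  # is_prime[x] = 0 -> prime number, 1 -> False
--     prime = []
--     for i in range(2, e+1):
--         if is_prime[i] == 0:
--             prime.append(i)  # i는 소수 목록에 추가
--             for x in range(i+i, e+1, i):
--                 is_prime[x] = 1
--     return prime
--
-- def solution(a, b):
--     answer = 0
--     prime = get_prime(b)
--     for p in prime:
--         t1, t2 = p**2, p**3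
--         if a <= t1 <= b:
--             answer += 1
--         if a <= t2 <= b:
--             answer += 1
--     return answer
-- ===== SOURCE B (Python) =====
-- import math
--
--
-- def solution(a, b):
--     # Trial-division primality test instead of a sieve: same e = int(math.sqrt(b)) cutoff.
--     e = int(math.sqrt(b))
--     answer = 0
--     for p in range(2, e + 1):
--         if all(p % d != 0 for d in range(2, int(math.sqrt(p)) + 1)):
--             t1, t2 = p * p, p * p * p
--             answer += (a <= t1 <= b) + (a <= t2 <= b)
--     return answer
-- ===== Notes on version B (the rewrite author's own statement) =====
-- stated objective: simpler
-- what changed: Replaces the Eratosthenes sieve (mutable mark array plus a collected prime list, then a second counting loop over that list) by a single loop over 2..int(sqrt(b)) that tests each candidate's primality by trial division up to its own square root and counts its square/cube in [a,b] on the fly.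
import Mathlib
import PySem

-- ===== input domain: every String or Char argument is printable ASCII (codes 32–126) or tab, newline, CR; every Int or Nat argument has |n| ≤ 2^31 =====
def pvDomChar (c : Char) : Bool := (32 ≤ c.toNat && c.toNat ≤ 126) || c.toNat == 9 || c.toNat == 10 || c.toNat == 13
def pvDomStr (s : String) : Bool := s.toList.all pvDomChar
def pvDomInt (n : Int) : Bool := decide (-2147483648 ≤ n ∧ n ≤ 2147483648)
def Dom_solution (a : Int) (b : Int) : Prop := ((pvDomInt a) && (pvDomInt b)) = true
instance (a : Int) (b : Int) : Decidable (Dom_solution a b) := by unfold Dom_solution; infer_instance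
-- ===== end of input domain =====

-- B replaces A's Eratosthenes sieve + second counting pass by one trial-division loop (objective: simpler).

-- ===== PORT A =====
-- int(math.sqrt(b)) = Int.sqrt b: exact for 0 ≤ b ≤ 2^31 (Dom ∧ Pre_); b < 0 raises and is excluded by Pre_.
-- All indices touched (i ∈ [2,e], x ∈ [2i,e]) are nonnegative and < e+1 = len(is_prime), so the total
-- forms pyGetD/pySetD are exact here.
def getPrime (b : Int) : List Int :=
  let e := Int.sqrt b
  let isPrime : List Int := List.replicate (e + 1).toNat 0
  let st :=
    (PySem.List.pyRange 2 (e + 1) 1).foldl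
      (fun (st : List Int × List Int) i =>
        if PySem.List.pyGetD st.1 i 0 == 0 then
          ((PySem.List.pyRange (i + i) (e + 1) i).foldl
              (fun arr x => PySem.List.pySetD arr x 1) st.1,
           st.2 ++ [i])
        else st)
      (isPrime, [])
  st.2

def solution (a : Int) (b : Int) : Int :=
  let prime := getPrime b
  prime.foldl
    (fun answer p =>
      let t1 := p ^ 2
      let t2 := p ^ 3
      let answer := if a ≤ t1 ∧ t1 ≤ b then answer + 1 else answer
      if a ≤ t2 ∧ t2 ≤ b then answer + 1 else answer)
    0

-- ===== PORT B =====
-- int(math.sqrt(p)) = Int.sqrt p: exact for the p ≤ 2^31 reached here; p % d with d ≥ 2 is PySem.Int.mod.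
def isPrimeTD (p : Int) : Bool :=
  (PySem.List.pyRange 2 (Int.sqrt p + 1) 1).all (fun d => PySem.Int.mod p d != 0)

def solution_alt (a : Int) (b : Int) : Int :=
  let e := Int.sqrt b
  (PySem.List.pyRange 2 (e + 1) 1).foldl
    (fun answer p =>
      if isPrimeTD p then
        answer + (if a ≤ p * p ∧ p * p ≤ b then 1 else 0)
               + (if a ≤ p * p * p ∧ p * p * p ≤ b then 1 else 0)
      else answer)
    0

-- ===== PRECONDITION & SPEC =====
-- Pre_ excludes b < 0, where int(math.sqrt(b)) raises ValueError in both A and B.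
def Pre_solution (a : Int) (b : Int) : Prop := 0 ≤ b
instance (a : Int) (b : Int) : Decidable (Pre_solution a b) := by unfold Pre_solution; infer_instance
def pvWitness_solution : Int × Int := (4, 30)

def Spec_solution (a : Int) (b : Int) (out : Int) : Prop := out = solution_alt a b
instance (a : Int) (b : Int) (out : Int) : Decidable (Spec_solution a b out) := by unfold Spec_solution; infer_instance

-- ===== CLAIM (what is proved, stated in full; the proofs are below) =====
def Claim_equal_solution : Prop := ∀ (a : Int) (b : Int), Dom_solution a b → Pre_solution a b → Spec_solution a b (solution a b)

-- ===== LEMMAS AND PROOFS =====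

-- "p has no proper divisor ≥ 2 below p", as a Bool over the same range the sieve scans.
def goodB (p : Int) : Bool := (PySem.List.pyRange 2 p 1).all (fun d => !(decide (d ∣ p)))

-- "x was marked after the sieve processed i = 2..k-1"
def markedB (x k : Int) : Bool :=
  (PySem.List.pyRange 2 k 1).any (fun d => decide (d ∣ x) && decide (2 * d ≤ x))

theorem goodB_iff (p : Int) : goodB p = true ↔ ∀ d, 2 ≤ d → d < p → ¬ d ∣ p := by
  simp [goodB, PySem.List.mem_pyRange_one]

theorem markedB_iff (x k : Int) : markedB x k = true ↔ ∃ d, 2 ≤ d ∧ d < k ∧ d ∣ x ∧ 2 * d ≤ x := by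
  simp [markedB, PySem.List.mem_pyRange_one]
  exact exists_congr fun d => by tauto

-- a proper divisor d of p ≥ 2 satisfies 2*d ≤ p
theorem dvd_proper_le (p d : Int) (hp : 2 ≤ p) (hd : 2 ≤ d) (hdp : d < p) (hdvd : d ∣ p) :
    2 * d ≤ p := by
  obtain ⟨j, hj⟩ := hdvd
  have hj1 : 1 ≤ j := by nlinarith
  have hjne : j ≠ 1 := by rintro rfl; rw [mul_one] at hj; omega
  have hj2 : 2 ≤ j := by omega
  nlinarith

theorem markedB_self (k : Int) (hk : 2 ≤ k) : markedB k k = !goodB k := by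
  rcases Bool.eq_false_or_eq_true (goodB k) with h | h
  · rw [h, Bool.not_true, ← Bool.not_eq_true, markedB_iff]
    rintro ⟨d, h1, h2, h3, _⟩
    exact (goodB_iff k).1 h d h1 h2 h3
  · rw [h, Bool.not_false, markedB_iff]
    have hng : ¬ ∀ d, 2 ≤ d → d < k → ¬ d ∣ k := by rw [← goodB_iff]; simp [h]
    push Not at hng
    obtain ⟨d, h1, h2, h3⟩ := hng
    exact ⟨d, h1, h2, h3, dvd_proper_le k d hk h1 h2 h3⟩

theorem int_sqrt_le (p : Int) (h : 0 ≤ p) : Int.sqrt p * Int.sqrt p ≤ p := by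
  have h1 := Nat.sqrt_le' p.toNat
  have h2 : ((Nat.sqrt p.toNat * Nat.sqrt p.toNat : Nat) : Int) ≤ (p.toNat : Int) := by
    rw [← pow_two]
    exact_mod_cast h1
  rw [Int.toNat_of_nonneg h] at h2
  rw [Int.sqrt]
  exact_mod_cast h2

theorem int_lt_succ_sqrt (p : Int) (h : 0 ≤ p) : p < (Int.sqrt p + 1) * (Int.sqrt p + 1) := by
  have h1 := Nat.lt_succ_sqrt' p.toNat
  have h2 : (p.toNat : Int) < (((Nat.sqrt p.toNat + 1) * (Nat.sqrt p.toNat + 1) : Nat) : Int) := by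
    rw [← pow_two]
    exact_mod_cast h1
  rw [Int.toNat_of_nonneg h] at h2
  rw [Int.sqrt]
  push_cast at h2 ⊢
  linarith

-- trial division up to sqrt equals scanning all proper divisors
theorem isPrimeTD_eq_goodB (p : Int) (hp : 2 ≤ p) : isPrimeTD p = goodB p := by
  have hp0 : (0:Int) ≤ p := by omega
  have hs0 : 0 ≤ Int.sqrt p := Int.sqrt_nonneg p
  have hsle := int_sqrt_le p hp0
  have hslt := int_lt_succ_sqrt p hp0
  rw [Bool.eq_iff_iff, goodB_iff]
  have hTD : isPrimeTD p = true ↔ ∀ d, 2 ≤ d → d < Int.sqrt p + 1 → ¬ d ∣ p := by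
    simp [isPrimeTD, PySem.List.mem_pyRange_one, ← PySem.Int.mod_eq_zero_iff_dvd]
  rw [hTD]
  constructor
  · intro h d h2 hdp hdvd
    obtain ⟨j, hj⟩ := hdvd
    have hj2 : 2 ≤ j := by
      have hj1 : 1 ≤ j := by nlinarith
      have : j ≠ 1 := by rintro rfl; rw [mul_one] at hj; omega
      omega
    have hjdvd : j ∣ p := ⟨d, by linarith [hj, mul_comm d j]⟩
    rcases le_or_gt d (Int.sqrt p) with hd | hd
    · exact h d h2 (by omega) ⟨j, hj⟩
    · rcases le_or_gt j (Int.sqrt p) with hjle | hjgt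
      · exact h j hj2 (by omega) hjdvd
      · nlinarith
  · intro h d h2 hdp hdvd
    have hdltp : d < p := by nlinarith
    exact h d h2 hdltp hdvd

-- the body of the sieve loop of getPrime, with e abstracted
def sieveStep (e : Int) (st : List Int × List Int) (i : Int) : List Int × List Int :=
  if PySem.List.pyGetD st.1 i 0 == 0 then
    ((PySem.List.pyRange (i + i) (e + 1) i).foldl
        (fun arr x => PySem.List.pySetD arr x 1) st.1,
     st.2 ++ [i])
  else st

theorem length_foldl_pySetD (lst : List Int) (arr : List Int) :
    (lst.foldl (fun a x => PySem.List.pySetD a x (1:Int)) arr).length = arr.length := by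
  induction lst generalizing arr with
  | nil => rfl
  | cons x t ih => simp [ih, PySem.List.length_pySetD]

theorem pyGetD_pySetD_int (xs : List Int) (i y v d : Int) (hi : 0 ≤ i)
    (hil : i < (xs.length : Int)) (hy : 0 ≤ y) :
    PySem.List.pyGetD (PySem.List.pySetD xs i v) y d
      = if y = i then v else PySem.List.pyGetD xs y d := by
  have hi' : i = ((i.toNat : Nat) : Int) := by omega
  have hy' : y = ((y.toNat : Nat) : Int) := by omega
  rw [hi', hy', PySem.List.pyGetD_pySetD_natCast xs i.toNat y.toNat v d (by omega)]
  by_cases h : y.toNat = i.toNat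
  · simp [h]
  · rw [if_neg h, if_neg (by omega : ¬ ((y.toNat : Int) = (i.toNat : Int)))]

theorem getD_foldl_pySetD (lst : List Int) (arr : List Int) (y : Int)
    (hl : ∀ x ∈ lst, 0 ≤ x ∧ x < (arr.length : Int)) (hy : 0 ≤ y) :
    PySem.List.pyGetD (lst.foldl (fun a x => PySem.List.pySetD a x (1:Int)) arr) y 0
      = if y ∈ lst then 1 else PySem.List.pyGetD arr y 0 := by
  induction lst generalizing arr with
  | nil => simp
  | cons x t ih =>
    have hx := hl x (List.mem_cons_self)
    have hrec := ih (PySem.List.pySetD arr x 1)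
      (by intro z hz; rw [PySem.List.length_pySetD]; exact hl z (List.mem_cons_of_mem x hz))
    simp only [List.foldl_cons]
    rw [hrec, pyGetD_pySetD_int arr x y 1 0 hx.1 hx.2 hy]
    by_cases h1 : y ∈ t
    · simp [h1]
    · by_cases h2 : y = x <;> simp [h1, h2]

-- the sieve invariant: after processing i = 2 .. k-1, the array marks exactly the
-- numbers with a divisor d ∈ [2,k) satisfying 2d ≤ x, and the list holds the goodB numbers
theorem sieve_inv (e : Int) (he : 0 ≤ e) :
    ∀ k : Int, 2 ≤ k → k ≤ e + 1 →
      (let st := (PySem.List.pyRange 2 k 1).foldl (sieveStep e)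
                   (List.replicate (e + 1).toNat 0, []);
       st.1.length = (e + 1).toNat ∧
       (∀ x : Int, 0 ≤ x → x ≤ e →
          PySem.List.pyGetD st.1 x 0 = (if markedB x k then 1 else 0)) ∧
       st.2 = (PySem.List.pyRange 2 k 1).filter goodB) := by
  intro k hk2
  induction k, hk2 using Int.le_induction with
  | base =>
    intro _
    refine ⟨?_, ?_, ?_⟩
    · simp [PySem.List.pyRange_one_eq_nil (by omega : (2:Int) ≤ 2)]
    · intro x hx0 hxe
      rw [PySem.List.pyRange_one_eq_nil (by omega : (2:Int) ≤ 2)]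
      have hm : markedB x 2 = false := by
        rw [← Bool.not_eq_true, markedB_iff]
        rintro ⟨d, h1, h2, _⟩; omega
      rw [hm]
      simp only [List.foldl_nil, if_neg (by simp : ¬ (false = true))]
      rw [PySem.List.pyGetD_of_nonneg _ _ hx0]
      simp [List.getD, List.getElem?_replicate]
      split <;> rfl
    · simp [PySem.List.pyRange_one_eq_nil (by omega : (2:Int) ≤ 2)]
  | succ k hk2 ih =>
    intro hke
    have hke' : k ≤ e := by omega
    obtain ⟨ihlen, ihget, ihpr⟩ := ih (by omega)
    rw [PySem.List.pyRange_one_succ_right (by omega : (2:Int) ≤ k), List.foldl_append,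
        List.filter_append]
    set st := (PySem.List.pyRange 2 k 1).foldl (sieveStep e)
                (List.replicate (e + 1).toNat 0, []) with hst
    simp only [List.foldl_cons, List.foldl_nil]
    have hgk : PySem.List.pyGetD st.1 k 0 = if markedB k k then 1 else 0 :=
      ihget k (by omega) hke'
    have hmark : ∀ x : Int,
        markedB x (k + 1) = (markedB x k || (decide (k ∣ x) && decide (2 * k ≤ x))) := by
      intro x
      unfold markedB
      rw [PySem.List.pyRange_one_succ_right (by omega : (2:Int) ≤ k), List.any_append]
      simp
    by_cases hg : goodB k = true
    · -- k is prime: mark the multiples 2k, 3k, … ≤ e and append k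
      have hm : markedB k k = false := by rw [markedB_self k hk2, hg, Bool.not_true]
      have hc : (PySem.List.pyGetD st.1 k 0 == 0) = true := by rw [hgk, hm]; decide
      rw [sieveStep, hc, if_pos rfl]
      have hbounds : ∀ x ∈ PySem.List.pyRange (k + k) (e + 1) k,
          0 ≤ x ∧ x < (st.1.length : Int) := by
        intro x hx
        rw [PySem.List.mem_pyRange_iff_of_pos (by omega) x] at hx
        rw [ihlen]
        omega
      refine ⟨?_, ?_, by rw [ihpr]; simp [hg]⟩
      · rw [length_foldl_pySetD, ihlen]
      · intro x hx0 hxe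
        rw [getD_foldl_pySetD _ _ _ hbounds hx0, ihget x hx0 hxe, hmark x]
        have hmem : x ∈ PySem.List.pyRange (k + k) (e + 1) k ↔ (k ∣ x ∧ 2 * k ≤ x) := by
          rw [PySem.List.mem_pyRange_iff_of_pos (by omega) x]
          constructor
          · rintro ⟨h1, _, h3⟩
            have h4 : k ∣ (x - (k + k)) + (k + k) := dvd_add h3 ⟨2, by ring⟩
            simp only [sub_add_cancel] at h4
            exact ⟨h4, by omega⟩
          · rintro ⟨h1, h2⟩
            exact ⟨by omega, by omega, dvd_sub h1 ⟨2, by ring⟩⟩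
        by_cases hmemb : x ∈ PySem.List.pyRange (k + k) (e + 1) k
        · have hcx := hmem.mp hmemb
          simp [hmemb, hcx.1, hcx.2]
        · have hnot : ¬ (k ∣ x ∧ 2 * k ≤ x) := fun hcx => hmemb (hmem.mpr hcx)
          have hand : (decide (k ∣ x) && decide (2 * k ≤ x)) = false := by
            by_cases h : (decide (k ∣ x) && decide (2 * k ≤ x)) = true
            · simp only [Bool.and_eq_true, decide_eq_true_eq] at h; exact absurd h hnot
            · simp only [Bool.not_eq_true] at h; exact h
          simp [hmemb, hand]
    · -- k is composite: the branch is not taken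
      simp only [Bool.not_eq_true] at hg
      have hm : markedB k k = true := by rw [markedB_self k hk2, hg, Bool.not_false]
      have hc : (PySem.List.pyGetD st.1 k 0 == 0) = false := by rw [hgk, hm]; decide
      rw [sieveStep, hc, if_neg (by simp)]
      have hng : ¬ ∀ d, 2 ≤ d → d < k → ¬ d ∣ k := by rw [← goodB_iff]; simp [hg]
      push Not at hng
      obtain ⟨d0, hd1, hd2, hd3⟩ := hng
      refine ⟨ihlen, ?_, by rw [ihpr]; simp [hg]⟩
      intro x hx0 hxe
      rw [ihget x hx0 hxe, hmark x]
      congr 1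
      by_cases h : (decide (k ∣ x) && decide (2 * k ≤ x)) = true
      · simp only [Bool.and_eq_true, decide_eq_true_eq] at h
        have hmx : markedB x k = true := by
          rw [markedB_iff]
          exact ⟨d0, hd1, hd2, hd3.trans h.1,
            by have := dvd_proper_le k d0 hk2 hd1 hd2 hd3; omega⟩
        simp [hmx, h]
      · simp only [Bool.not_eq_true] at h
        simp [h]

theorem getPrime_eq_filter (b : Int) (hb : 0 ≤ b) :
    getPrime b = (PySem.List.pyRange 2 (Int.sqrt b + 1) 1).filter goodB := by
  have he : 0 ≤ Int.sqrt b := Int.sqrt_nonneg b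
  rcases le_or_gt (Int.sqrt b + 1) 2 with h | h
  · rw [getPrime, PySem.List.pyRange_one_eq_nil h]
    simp
  · have h2 := sieve_inv (Int.sqrt b) he (Int.sqrt b + 1) (by omega) (by omega)
    simp only at h2
    rw [getPrime]
    exact h2.2.2

theorem solution_spec' : ∀ (a b : Int), 0 ≤ b → solution a b = solution_alt a b := by
  intro a b hb
  rw [solution, solution_alt]
  simp only []
  rw [getPrime_eq_filter b hb]
  rw [PySem.List.foldl_if_eq_foldl_filter isPrimeTD
        (fun answer p => answer + (if a ≤ p * p ∧ p * p ≤ b then 1 else 0)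
                                + (if a ≤ p * p * p ∧ p * p * p ≤ b then 1 else 0))]
  have hfilt : List.filter goodB (PySem.List.pyRange 2 (Int.sqrt b + 1))
      = List.filter isPrimeTD (PySem.List.pyRange 2 (Int.sqrt b + 1)) :=
    List.filter_congr (fun p hp => by
      rw [PySem.List.mem_pyRange_one] at hp
      exact (isPrimeTD_eq_goodB p hp.1).symm)
  rw [hfilt]
  apply PySem.List.foldl_congr_mem
  intro acc p hp
  rw [List.mem_filter, PySem.List.mem_pyRange_one] at hp
  have h2 : p ^ 2 = p * p := by ring
  have h3 : p ^ 3 = p * p * p := by ring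
  simp only [h2, h3]
  split_ifs <;> ring

-- ===== VERDICT (by name: the statement is the Claim_ definition above) =====
theorem solution_spec : Claim_equal_solution := by
  intro a b _ hpre
  unfold Spec_solution
  exact solution_spec' a b hpre
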